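-- pv_equiv track=rewrite | github.com/pkkalive/DSA | Arrays/LittlePonnyAndMaximumElement.py | ponny_maximum
-- ===== SOURCE A (Python) =====
-- def ponny_maximum(arr, key):
--     count, flag = 0, False
--     for num in arr:
--         if num == key:
--             flag = True
--         if num > key:
--             count += 1
--
--     if flag:
--         return count
--     return -1
-- ===== SOURCE B (Python) =====
-- def ponny_maximum(arr, key):
--     if key in arr:
--         return sum(1 for x in arr if x > key)
--     return -1
-- ===== Notes on version B (the rewrite author's own statement) =====
-- stated objective: idiomatic
-- what changed: A's single loop threading a presence flag and a running count is replaced by a membership test followed by a separate counting pass (sum over a generator).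
import Mathlib
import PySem

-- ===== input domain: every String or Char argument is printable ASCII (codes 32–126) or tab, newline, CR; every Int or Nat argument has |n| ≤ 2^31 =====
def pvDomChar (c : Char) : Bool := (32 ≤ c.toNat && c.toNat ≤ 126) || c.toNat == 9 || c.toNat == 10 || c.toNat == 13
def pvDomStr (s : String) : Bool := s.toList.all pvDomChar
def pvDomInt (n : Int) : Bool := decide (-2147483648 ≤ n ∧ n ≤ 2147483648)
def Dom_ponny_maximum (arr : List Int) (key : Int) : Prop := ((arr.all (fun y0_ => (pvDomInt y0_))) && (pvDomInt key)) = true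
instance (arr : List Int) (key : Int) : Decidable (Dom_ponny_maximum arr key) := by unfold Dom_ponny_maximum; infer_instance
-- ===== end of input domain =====

-- B replaces A's single loop with a flag+count state by a membership test then a separate counting pass (idiomatic decomposition, same cost).


-- ===== PORT A =====
-- loop over arr with state (count, flag), then return count if flag else -1
def ponny_maximum (arr : List Int) (key : Int) : Int :=
  let st := arr.foldl (fun (s : Int × Bool) num =>
      let s := if num == key then (s.1, true) else s
      if num > key then (s.1 + 1, s.2) else s) (0, false)
  if st.2 then st.1 else -1

-- ===== PORT B =====
-- membership test, then a separate counting pass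
def ponny_maximum_alt (arr : List Int) (key : Int) : Int :=
  if arr.contains key then
    ((arr.filter (fun x => x > key)).length : Int)
  else -1

-- ===== PRECONDITION & SPEC =====
def Spec_ponny_maximum (arr : List Int) (key : Int) (out : Int) : Prop := out = ponny_maximum_alt arr key
instance (arr : List Int) (key : Int) (out : Int) : Decidable (Spec_ponny_maximum arr key out) := by unfold Spec_ponny_maximum; infer_instance

-- ===== CLAIM (what is proved, stated in full; the proofs are below) =====
def Claim_equal_ponny_maximum : Prop := ∀ (arr : List Int) (key : Int), Dom_ponny_maximum arr key → Spec_ponny_maximum arr key (ponny_maximum arr key)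

-- ===== LEMMAS AND PROOFS =====

-- loop invariant: the fold accumulates the count of elements > key and ORs in membership
theorem ponny_fold_char (key : Int) (arr : List Int) (c : Int) (f : Bool) :
    arr.foldl (fun (s : Int × Bool) num =>
      let s := if num == key then (s.1, true) else s
      if num > key then (s.1 + 1, s.2) else s) (c, f)
    = (c + ((arr.filter (fun x => x > key)).length : Int), f || arr.contains key) := by
  induction arr generalizing c f with
  | nil => simp
  | cons x xs ih =>
    rw [List.foldl_cons,
      show ((let s := if x == key then ((c, f).1, true) else (c, f)
             if x > key then (s.1 + 1, s.2) else s) : Int × Bool)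
          = (if x > key then c + 1 else c, f || (x == key)) from by
        by_cases hx : x = key <;> by_cases hg : x > key <;> simp [hx, hg]]
    by_cases hg : x > key <;> by_cases hx : x = key <;>
        simp only [hg, hx, if_true, if_false, ih, List.filter_cons, List.contains_cons] <;>
      simp [BEq.comm, beq_eq_decide, Bool.or_assoc, Prod.ext_iff] <;>
      push_cast <;> omega

-- ===== VERDICT (by name: the statement is the Claim_ definition above) =====
theorem ponny_maximum_spec : Claim_equal_ponny_maximum := by
  intro arr key _
  unfold Spec_ponny_maximum ponny_maximum ponny_maximum_alt
  simp only [ponny_fold_char, Bool.false_or]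
  by_cases h : arr.contains key <;> simp [h]
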